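-- pv_equiv track=rewrite | github.com/davhogan/MachineLearning-MarchMadness-BSF | March_Madness/March_Madness_Best_first_Searches.py | fill_team_regions
-- ===== SOURCE A (Python) =====
-- def fill_team_regions(all_teams):
--     south_teams = []
--     east_teams = []
--     west_teams = []
--     mid_west_teams = []
--
--     for i in range (0,len(all_teams)):
--         if all_teams[i][1] == 'South':
--             south_teams.append(all_teams[i])
--         elif all_teams[i][1] == 'East':
--             east_teams.append(all_teams[i])
--         elif all_teams[i][1] == 'West':
--             west_teams.append(all_teams[i])
--         else:
--             mid_west_teams.append(all_teams[i])
--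
--     sorted(south_teams, key=lambda x: x[1])
--     sorted(east_teams, key=lambda x: x[1])
--     sorted(west_teams, key=lambda x: x[1])
--     sorted(mid_west_teams, key=lambda x: x[1])
--
--     return south_teams, east_teams, west_teams, mid_west_teams
-- ===== SOURCE B (Python) =====
-- def fill_team_regions(all_teams):
--     south_teams = [t for t in all_teams if t[1] == 'South']
--     east_teams = [t for t in all_teams if t[1] == 'East']
--     west_teams = [t for t in all_teams if t[1] == 'West']
--     mid_west_teams = [t for t in all_teams if t[1] not in ('South', 'East', 'West')]
--     return south_teams, east_teams, west_teams, mid_west_teams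
-- ===== Notes on version B (the rewrite author's own statement) =====
-- stated objective: idiomatic
-- what changed: Replaces the single branched index loop (plus four dead sorted() calls) with four independent list-comprehension filtering passes, the Midwest one via a negated membership test.
import Mathlib
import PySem

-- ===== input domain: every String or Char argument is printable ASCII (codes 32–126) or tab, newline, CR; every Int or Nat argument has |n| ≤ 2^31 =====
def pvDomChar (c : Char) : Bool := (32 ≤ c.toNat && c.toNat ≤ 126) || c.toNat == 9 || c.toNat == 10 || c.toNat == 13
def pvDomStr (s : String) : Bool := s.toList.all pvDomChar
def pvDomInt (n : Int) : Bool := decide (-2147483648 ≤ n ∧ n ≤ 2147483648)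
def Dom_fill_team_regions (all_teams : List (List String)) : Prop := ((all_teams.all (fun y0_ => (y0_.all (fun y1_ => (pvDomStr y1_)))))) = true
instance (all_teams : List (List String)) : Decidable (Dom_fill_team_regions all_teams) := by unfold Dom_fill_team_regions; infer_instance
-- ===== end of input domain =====

-- ===== PORT A =====
-- B is the same partition done idiomatically: four independent filtering comprehensions instead of one branched index loop.
-- A's step: inspect all_teams[i][1] and append to one of the four accumulators (pyGetD defaults are hit only outside Pre_).
def fillStepA (st : List (List String) × List (List String) × List (List String) × List (List String))
    (t : List String) :
    List (List String) × List (List String) × List (List String) × List (List String) :=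
  let r := PySem.List.pyGetD t 1 ""
  if r = "South" then (st.1 ++ [t], st.2.1, st.2.2.1, st.2.2.2)
  else if r = "East" then (st.1, st.2.1 ++ [t], st.2.2.1, st.2.2.2)
  else if r = "West" then (st.1, st.2.1, st.2.2.1 ++ [t], st.2.2.2)
  else (st.1, st.2.1, st.2.2.1, st.2.2.2 ++ [t])

def fill_team_regions (all_teams : List (List String)) : List (List String) × List (List String) × List (List String) × List (List String) :=
  let res := (PySem.List.pyRange 0 (all_teams.length : Int) 1).foldl
      (fun st j => fillStepA st (PySem.List.pyGetD all_teams j [])) ([], [], [], [])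
  -- the four sorted() calls of A discard their results and have no effect on the return value
  let _ := PySem.List.sorted res.1 (key := fun x => PySem.List.pyGetD x 1 "")
  let _ := PySem.List.sorted res.2.1 (key := fun x => PySem.List.pyGetD x 1 "")
  let _ := PySem.List.sorted res.2.2.1 (key := fun x => PySem.List.pyGetD x 1 "")
  let _ := PySem.List.sorted res.2.2.2 (key := fun x => PySem.List.pyGetD x 1 "")
  (res.1, res.2.1, res.2.2.1, res.2.2.2)

-- ===== PORT B =====
def regOf (t : List String) : String := PySem.List.pyGetD t 1 ""

def fill_team_regions_alt (all_teams : List (List String)) : List (List String) × List (List String) × List (List String) × List (List String) :=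
  (all_teams.filter (fun t => regOf t == "South"),
   all_teams.filter (fun t => regOf t == "East"),
   all_teams.filter (fun t => regOf t == "West"),
   all_teams.filter (fun t => !(regOf t ∈ ["South", "East", "West"])))

-- ===== PRECONDITION & SPEC =====
-- Pre_ excludes exactly the inputs on which Python A raises IndexError: a team list with fewer than 2 entries.
def Pre_fill_team_regions (all_teams : List (List String)) : Prop :=
  (all_teams.all (fun t => 2 ≤ t.length)) = true
instance (all_teams : List (List String)) : Decidable (Pre_fill_team_regions all_teams) := by unfold Pre_fill_team_regions; infer_instance
def pvWitness_fill_team_regions : List (List String) :=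
  [["a", "South"], ["b", "East"], ["c", "Mid"], ["d", "West"]]
def Spec_fill_team_regions (all_teams : List (List String)) (out : List (List String) × List (List String) × List (List String) × List (List String)) : Prop := out = fill_team_regions_alt all_teams
instance (all_teams : List (List String)) (out : List (List String) × List (List String) × List (List String) × List (List String)) : Decidable (Spec_fill_team_regions all_teams out) := by unfold Spec_fill_team_regions; infer_instance

-- ===== CLAIM (what is proved, stated in full; the proofs are below) =====
def Claim_equal_fill_team_regions : Prop := ∀ (all_teams : List (List String)), Dom_fill_team_regions all_teams → Pre_fill_team_regions all_teams → Spec_fill_team_regions all_teams (fill_team_regions all_teams)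

-- ===== LEMMAS AND PROOFS =====
theorem foldl_fill_eq (xs : List (List String))
    (a b c d : List (List String)) :
    xs.foldl fillStepA (a, b, c, d)
    = (a ++ xs.filter (fun t => regOf t == "South"),
       b ++ xs.filter (fun t => regOf t == "East"),
       c ++ xs.filter (fun t => regOf t == "West"),
       d ++ xs.filter (fun t => !(regOf t ∈ ["South", "East", "West"]))) := by
  induction xs generalizing a b c d with
  | nil => simp
  | cons t xs ih =>
    simp only [List.foldl_cons, List.filter_cons, fillStepA, regOf]
    by_cases hS : PySem.List.pyGetD t 1 "" = "South"
    · simp [hS, ih]; exact ⟨rfl, rfl, rfl, rfl⟩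
    · by_cases hE : PySem.List.pyGetD t 1 "" = "East"
      · simp [hE, ih]; exact ⟨rfl, rfl, rfl, rfl⟩
      · by_cases hW : PySem.List.pyGetD t 1 "" = "West"
        · simp [hW, ih]; exact ⟨rfl, rfl, rfl, rfl⟩
        · simp [hS, hE, hW, ih]; exact ⟨rfl, rfl, rfl, rfl⟩

-- ===== VERDICT (by name: the statement is the Claim_ definition above) =====
theorem fill_team_regions_spec : Claim_equal_fill_team_regions := by
  intro all_teams _ _
  unfold Spec_fill_team_regions fill_team_regions fill_team_regions_alt
  rw [PySem.List.foldl_pyRange_zero_pyGetD' all_teams ([] : List String) fillStepA]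
  rw [foldl_fill_eq]
  simp
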